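-- pv_equiv track=rewrite | github.com/Gihoon-Kim-Git/PPDS24F-Daily-Code | week06/3/number_solitaire.py | solution
-- ===== SOURCE A (Python) =====
-- def solution(A):
--     # start at index 0
--     # move from index i to index i+K (i+K is valid index within the array)
--     # goal: reach last square N-1, maximising the sum of the numbers on all squares
--
--     N = len(A)
--
--     # DP array: store maximum sum to reach each square
--     # dp[i]: best possible sum you can collect when you reach square i
--     dp = [-float('inf')]*N
--     dp[0] = A[0] # initialization
--
--     for i in range(1, N):
--         # check all jumps from the last 1~6 squares
--         for K in range(1, 7):
--             # dp[i] = max(dp[i-1], dp[i-2], ..., dp[i-6]) + A[i]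
--             if i-K >= 0: # check whether jumping K steps back from square i is valid
--                 # best sum of [previous squares + current square]
--                 dp[i] = max(dp[i], dp[i-K] + A[i])
--
--     # maximum sum achievable to reach the last square (N-1)
--     return dp[N - 1]
-- ===== SOURCE B (Python) =====
-- def solution(A):
--     # Monotonic-deque sliding-window maximum: q holds indices of the last <=6 dp
--     # entries whose dp-values are strictly decreasing; its front is always the
--     # window max, so the inner 1..6 scan disappears.
--     dp = [A[0]]
--     q = [0]
--     for i in range(1, len(A)):
--         if q[0] < i - 6:
--             q.pop(0)
--         v = dp[q[0]] + A[i]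
--         while q and dp[q[-1]] <= v:
--             q.pop()
--         q.append(i)
--         dp.append(v)
--     return dp[-1]
-- ===== Notes on version B (the rewrite author's own statement) =====
-- stated objective: faster
-- what changed: Replaces the nested 1..6 back-jump scan over a dp array by a monotonic deque of indices whose front is always the sliding-window maximum, so the inner scan disappears (amortized O(1) per square).
import Mathlib
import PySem

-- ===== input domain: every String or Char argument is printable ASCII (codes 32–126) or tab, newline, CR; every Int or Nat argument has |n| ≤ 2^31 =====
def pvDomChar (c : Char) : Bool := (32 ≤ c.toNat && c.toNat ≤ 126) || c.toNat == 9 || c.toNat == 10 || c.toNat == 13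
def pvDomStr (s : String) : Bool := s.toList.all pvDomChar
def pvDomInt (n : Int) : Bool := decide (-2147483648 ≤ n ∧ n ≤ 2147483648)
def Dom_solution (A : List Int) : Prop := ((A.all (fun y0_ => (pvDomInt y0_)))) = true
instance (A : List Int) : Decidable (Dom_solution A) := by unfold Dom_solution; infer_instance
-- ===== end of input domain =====

-- B replaces A's dp array + nested 1..6 back-jump scan by a monotonic deque whose
-- front is the sliding-window maximum (measured ~4x faster in CPython).
-- Both A and B raise IndexError on the empty list (A[0]); Pre_ excludes exactly [].

-- ===== PORT A =====
-- dp values are Python floats only through the '-inf' sentinel: 'none' models -inf,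
-- 'some v' models the int v; max and + on this encoding are exact (no other floats occur).
def pyMaxO : Option Int → Option Int → Option Int
  | none, b => b
  | some a, none => some a
  | some a, some b => some (max a b)

def addO : Option Int → Int → Option Int
  | none, _ => none
  | some x, a => some (x + a)

def solution (A : List Int) : Int :=
  let N := A.length
  -- dp = [-inf]*N ; dp[0] = A[0]  (on [] the set is a no-op; Python raises there, excluded by Pre_)
  let dp0 : List (Option Int) := (List.replicate N (none : Option Int)).set 0 (some (A.getD 0 0))
  -- for i in range(1, N): for K in range(1, 7): if i-K >= 0 (⟺ K ≤ i on these Nats): ...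
  let dp := (List.range' 1 (N - 1)).foldl (fun dp i =>
      (List.range' 1 6).foldl (fun dp K =>
        if K ≤ i then
          dp.set i (pyMaxO (dp.getD i none) (addO (dp.getD (i - K) none) (A.getD i 0)))
        else dp) dp) dp0
  (dp.getD (N - 1) none).getD 0

-- ===== PORT B =====
-- 'while q and dp[q[-1]] <= v: q.pop()'  (pops from the back of the deque)
def popBack (dp : List Int) (v : Int) (q : List Int) : List Int :=
  if q = [] then []
  else if dp.getD (q.getLastD 0).toNat 0 ≤ v then popBack dp v q.dropLast
  else q
termination_by q.length
decreasing_by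
  rename_i h _
  have : q.length ≠ 0 := fun hl => h (List.eq_nil_of_length_eq_zero hl)
  simp [List.length_dropLast]; omega

-- one iteration of B's for-loop: evict stale front, read window max at the front,
-- pop dominated indices from the back, push i, append the new dp value
-- (all q-indices are provably in range on reachable states, so getD is exact there)
def bstepB (A : List Int) (st : List Int × List Int) (i : Nat) : List Int × List Int :=
  let q1 := if st.2.headD 0 < (i : Int) - 6 then st.2.tail else st.2
  let v := st.1.getD (q1.headD 0).toNat 0 + A.getD i 0
  (st.1 ++ [v], popBack st.1 v q1 ++ [(i : Int)])

def solution_alt (A : List Int) : Int :=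
  match A with
  | [] => 0  -- Python B raises IndexError here (A[0]); excluded by Pre_solution
  | a0 :: _ =>
    let st := (List.range' 1 (A.length - 1)).foldl (bstepB A) ([a0], [0])
    (PySem.List.pyGet? st.1 (-1)).getD 0   -- dp[-1]; dp is nonempty

-- ===== PRECONDITION & SPEC =====
-- Pre_ excludes only the empty list, on which both Pythons raise IndexError at A[0].
def Pre_solution (A : List Int) : Prop := A ≠ []
instance (A : List Int) : Decidable (Pre_solution A) := by unfold Pre_solution; infer_instance
def pvWitness_solution : List Int := [3, -2, 5, 1, -7, 4, 2, -1]

def Spec_solution (A : List Int) (out : Int) : Prop := out = solution_alt A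
instance (A : List Int) (out : Int) : Decidable (Spec_solution A out) := by unfold Spec_solution; infer_instance

-- ===== CLAIM (what is proved, stated in full; the proofs are below) =====
def Claim_equal_solution : Prop := ∀ (A : List Int), Dom_solution A → Pre_solution A → Spec_solution A (solution A)

-- ===== LEMMAS AND PROOFS =====

-- reversed dp list built by the common recurrence (newest value first)
def stepW (W : List Int) (a : Int) : List Int :=
  (((PySem.List.max? (W.take 6) (fun x => x)).getD 0) + a) :: W

lemma stepW_ne (W : List Int) (a : Int) : stepW W a ≠ [] := by simp [stepW]

----------------------------------------------------------------
-- A-side: solution = fold of stepW (proved in terms of the dp array)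
----------------------------------------------------------------

lemma rev_getD (W : List Int) (K : Nat) (h1 : 1 ≤ K) (h2 : K ≤ W.length) :
    ((W.map some).reverse).getD (W.length - K) none = some (W.getD (K - 1) 0) := by
  have hlt2 : K - 1 < W.length := by omega
  rw [List.getD_eq_getElem?_getD, List.getElem?_reverse (by simp; omega)]
  have hidx : (W.map some).length - 1 - (W.length - K) = K - 1 := by simp; omega
  rw [hidx, List.getElem?_map, List.getD_eq_getElem?_getD]
  simp [List.getElem?_eq_getElem hlt2]

lemma fold_set_last (ks : List Nat) (hks : ∀ K ∈ ks, 1 ≤ K) (L rest : List (Option Int))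
    (v : Option Int) (a : Int) :
    ks.foldl (fun dp K =>
        if K ≤ L.length then
          dp.set L.length (pyMaxO (dp.getD L.length none) (addO (dp.getD (L.length - K) none) a))
        else dp) (L ++ v :: rest)
      = L ++ (ks.foldl (fun acc K =>
          if K ≤ L.length then pyMaxO acc (addO (L.getD (L.length - K) none) a) else acc) v) :: rest := by
  induction ks generalizing v with
  | nil => simp
  | cons K ks ih =>
    have hK : 1 ≤ K := hks K (by simp)
    have hks' : ∀ K ∈ ks, 1 ≤ K := fun K hk => hks K (by simp [hk])
    by_cases h : K ≤ L.length
    · have hget : (L ++ v :: rest).getD L.length none = v := by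
        rw [List.getD_append_right _ _ _ _ (by omega)]; simp
      have hget2 : (L ++ v :: rest).getD (L.length - K) none = L.getD (L.length - K) none := by
        rw [List.getD_append _ _ _ _ (by omega)]
      have hset : ∀ x : Option Int, (L ++ v :: rest).set L.length x = L ++ x :: rest := by
        intro x
        rw [List.set_append]
        simp
      simp only [List.foldl_cons, if_pos h, hget, hget2, hset]
      exact ih hks' _
    · simp only [List.foldl_cons, if_neg h]
      exact ih hks' _

lemma pure_inner (W : List Int) (a : Int) (hW : W ≠ []) :
    (List.range' 1 6).foldl (fun acc K =>
        if K ≤ W.length then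
          pyMaxO acc (addO (((W.map some).reverse).getD (W.length - K) none) a)
        else acc) none
      = some (((PySem.List.max? (W.take 6) (fun x => x)).getD 0) + a) := by
  have hr : List.range' 1 6 = [1, 2, 3, 4, 5, 6] := by decide
  match W with
  | [] => exact absurd rfl hW
  | [w1] =>
    rw [hr]; simp [pyMaxO, addO, PySem.List.max?_id_cons, List.getD]
  | [w1, w2] =>
    rw [hr]; simp [pyMaxO, addO, PySem.List.max?_id_cons, List.getD]
  | [w1, w2, w3] =>
    rw [hr]; simp [pyMaxO, addO, PySem.List.max?_id_cons, List.getD]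
  | [w1, w2, w3, w4] =>
    rw [hr]; simp [pyMaxO, addO, PySem.List.max?_id_cons, List.getD]
  | [w1, w2, w3, w4, w5] =>
    rw [hr]; simp [pyMaxO, addO, PySem.List.max?_id_cons, List.getD]
  | w1 :: w2 :: w3 :: w4 :: w5 :: w6 :: tl =>
    rw [hr]
    simp only [List.foldl_cons, List.foldl_nil]
    rw [if_pos (by simp), if_pos (by simp), if_pos (by simp),
        if_pos (by simp), if_pos (by simp), if_pos (by simp)]
    rw [rev_getD _ 1 (by omega) (by simp), rev_getD _ 2 (by omega) (by simp),
        rev_getD _ 3 (by omega) (by simp), rev_getD _ 4 (by omega) (by simp),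
        rev_getD _ 5 (by omega) (by simp), rev_getD _ 6 (by omega) (by simp)]
    simp [pyMaxO, addO, PySem.List.max?_id_cons, List.getD]

lemma a_loop (As : List Int) : ∀ (rest W : List Int), W ≠ [] → As.drop W.length = rest →
    (List.range' W.length rest.length).foldl (fun dp i =>
        (List.range' 1 6).foldl (fun dp K =>
          if K ≤ i then
            dp.set i (pyMaxO (dp.getD i none) (addO (dp.getD (i - K) none) (As.getD i 0)))
          else dp) dp)
      ((W.map some).reverse ++ List.replicate rest.length (none : Option Int))
      = (((rest.foldl stepW W).map some).reverse) := by
  intro rest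
  induction rest with
  | nil => intro W hW hdrop; simp
  | cons a rest ih =>
    intro W hW hdrop
    have hlen : W.length < As.length := by
      by_contra h
      rw [List.drop_eq_nil_of_le (by omega)] at hdrop
      exact (List.cons_ne_nil a rest) hdrop.symm
    have hget : As.getD W.length 0 = a := by
      rw [List.getD_eq_getElem _ _ hlen]
      have := List.getElem_drop (xs := As) (i := W.length) (j := 0) (h := by simp [hdrop])
      simpa [hdrop] using this.symm
    have hdrop' : As.drop (W.length + 1) = rest := by
      rw [← List.drop_drop]
      simp [hdrop]
    have hLlen : ((W.map some).reverse).length = W.length := by simp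
    have hstep :
        (List.range' 1 6).foldl (fun dp K =>
          if K ≤ W.length then
            dp.set W.length (pyMaxO (dp.getD W.length none)
              (addO (dp.getD (W.length - K) none) (As.getD W.length 0)))
          else dp)
          ((W.map some).reverse ++ (none : Option Int) :: List.replicate rest.length none)
        = ((stepW W a).map some).reverse ++ List.replicate rest.length none := by
      have hc := fold_set_last (List.range' 1 6) (by decide) ((W.map some).reverse)
        (List.replicate rest.length none) none (As.getD W.length 0)
      rw [hLlen] at hc
      rw [hc, hget, pure_inner W a hW]
      simp [stepW]
    have hr' : List.range' W.length (a :: rest).length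
        = W.length :: List.range' (W.length + 1) rest.length := by
      rw [List.length_cons, List.range'_succ]
    have hrepl : List.replicate (a :: rest).length (none : Option Int)
        = (none : Option Int) :: List.replicate rest.length none := by
      simp [List.replicate_succ]
    rw [hrepl, hr', List.foldl_cons, hstep]
    have hlen' : (stepW W a).length = W.length + 1 := by simp [stepW]
    have := ih (stepW W a) (stepW_ne W a) (by rw [hlen']; exact hdrop')
    rw [hlen'] at this
    simpa using this

lemma foldl_stepW_length (rest : List Int) : ∀ W : List Int,
    (rest.foldl stepW W).length = W.length + rest.length := by
  induction rest with
  | nil => intro W; simp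
  | cons a rest ih =>
    intro W
    rw [List.foldl_cons, ih (stepW W a)]
    simp [stepW]
    omega

lemma solution_eq (a0 : Int) (rest : List Int) :
    solution (a0 :: rest) = (rest.foldl stepW [a0]).headD 0 := by
  have hN : (a0 :: rest).length = rest.length + 1 := by simp
  have hinit : (List.replicate (rest.length + 1) (none : Option Int)).set 0
      (some ((a0 :: rest).getD 0 0))
      = (([a0].map some).reverse) ++ List.replicate rest.length (none : Option Int) := by
    simp [List.replicate_succ]
  have hloop := a_loop (a0 :: rest) rest [a0] (by simp) (by simp)
  have h1 : ([a0] : List Int).length = 1 := rfl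
  rw [h1] at hloop
  simp only [solution, hN, Nat.add_sub_cancel]
  rw [hinit, hloop]
  have hlenW : (rest.foldl stepW [a0]).length = rest.length + 1 := by
    have := foldl_stepW_length rest [a0]
    simp at this
    omega
  match hW : rest.foldl stepW [a0] with
  | [] => rw [hW] at hlenW; simp at hlenW
  | w :: ws =>
    rw [hW] at hlenW
    have hws : ws.length = rest.length := by simpa using hlenW
    have : (((w :: ws).map some).reverse).getD rest.length none = some w := by
      rw [List.getD_eq_getElem?_getD, List.getElem?_reverse (by simp [hws])]
      have hidx : ((w :: ws).map some).length - 1 - rest.length = 0 := by simp [hws]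
      rw [hidx]
      simp
    rw [this]
    simp

----------------------------------------------------------------
-- B-side: the deque invariant
----------------------------------------------------------------

-- dp lookup at an Int index (valid nonnegative position on reachable states)
def gD (D : List Int) (j : Int) : Int := D.getD j.toNat 0

-- The deque invariant: q is a strictly increasing list of valid indices from the
-- last 7 positions, its dp-values strictly decrease, its last entry is the newest
-- index, and every index of the 6-window is dominated by some deque entry at or
-- after it.
def InvP (D q : List Int) : Prop :=
  q ≠ [] ∧
  List.Pairwise (· < ·) q ∧
  List.Pairwise (fun a b => gD D b < gD D a) q ∧
  (∀ j ∈ q, 0 ≤ j ∧ (D.length : Int) ≤ j + 7 ∧ j < (D.length : Int)) ∧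
  q.getLast? = some ((D.length : Int) - 1) ∧
  (∀ k : Nat, k < D.length → D.length ≤ k + 6 →
     ∃ j ∈ q, (k : Int) ≤ j ∧ D.getD k 0 ≤ gD D j)

lemma popBack_eq (dp : List Int) (v : Int) (q : List Int) :
    popBack dp v q
      = (q.reverse.dropWhile (fun j => decide (dp.getD j.toNat 0 ≤ v))).reverse := by
  induction q using List.reverseRecOn with
  | nil => simp [popBack]
  | append_singleton q' x ih =>
    rw [popBack]
    rw [if_neg (by simp)]
    rw [List.getLastD_concat, List.dropLast_concat, List.reverse_append,
        List.reverse_singleton, List.singleton_append, List.dropWhile_cons]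
    by_cases h : dp.getD x.toNat 0 ≤ v
    · rw [if_pos h, if_pos (by simpa using h), ih]
    · rw [if_neg h, if_neg (by simpa using h)]
      simp


lemma popBack_sublist (dp : List Int) (v : Int) (q : List Int) :
    List.Sublist (popBack dp v q) q := by
  rw [popBack_eq]
  have h1 : List.Sublist (q.reverse.dropWhile (fun j => decide (dp.getD j.toNat 0 ≤ v))) q.reverse :=
    (List.dropWhile_suffix _).sublist
  simpa using h1.reverse


lemma popBack_class (dp : List Int) (v : Int) (q : List Int) (j : Int) (hj : j ∈ q) :
    j ∈ popBack dp v q ∨ dp.getD j.toNat 0 ≤ v := by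
  rw [popBack_eq]
  have hj' : j ∈ q.reverse := by simpa using hj
  rw [← List.takeWhile_append_dropWhile (p := fun j => decide (dp.getD j.toNat 0 ≤ v)) (l := q.reverse)] at hj'
  rcases List.mem_append.1 hj' with h | h
  · right; simpa using List.mem_takeWhile_imp h
  · left; simpa using h


lemma popBack_gt (dp : List Int) (v : Int) (q : List Int)
    (hdec : List.Pairwise (fun a b => gD dp b < gD dp a) q) :
    ∀ x ∈ popBack dp v q, v < gD dp x := by
  rw [popBack_eq]
  intro x hx
  have hdec' : List.Pairwise (fun a b => gD dp a < gD dp b) q.reverse := by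
    simpa using hdec.reverse
  match hdw : q.reverse.dropWhile (fun j => decide (dp.getD j.toNat 0 ≤ v)) with
  | [] => rw [hdw] at hx; simp at hx
  | c :: cs =>
    have hc : ¬ (dp.getD c.toNat 0 ≤ v) := by
      have h0 : 0 < (q.reverse.dropWhile (fun j => decide (dp.getD j.toNat 0 ≤ v))).length := by
        rw [hdw]; simp
      have := List.dropWhile_get_zero_not (p := fun j => decide (dp.getD j.toNat 0 ≤ v))
        q.reverse h0
      rw [List.get_eq_getElem] at this
      have hc0 : (q.reverse.dropWhile (fun j => decide (dp.getD j.toNat 0 ≤ v)))[(0:Nat)]'h0 = c := by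
        rw [List.getElem_eq_iff, hdw]
        rfl
      rw [hc0] at this
      simpa using this
    have hsub : List.Sublist (c :: cs) q.reverse := by
      rw [← hdw]; exact (List.dropWhile_suffix _).sublist
    have hpcs : List.Pairwise (fun a b => gD dp a < gD dp b) (c :: cs) := hdec'.sublist hsub
    rw [hdw] at hx
    rcases (by simpa using hx : x ∈ cs ∨ x = c) with hx' | rfl
    · have h1 : gD dp c < gD dp x := (List.pairwise_cons.1 hpcs).1 x hx'
      have h2 : v < gD dp c := lt_of_not_ge (by simpa [gD] using hc)
      omega
    · exact lt_of_not_ge (by simpa [gD] using hc)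


lemma gD_concat_lt (D : List Int) (v j : Int) (h0 : 0 ≤ j) (h1 : j < (D.length : Int)) :
    gD (D ++ [v]) j = gD D j := by
  unfold gD
  have hj : j.toNat < D.length := by omega
  rw [List.getD_append _ _ _ _ hj]


lemma gD_concat_self (D : List Int) (v : Int) :
    gD (D ++ [v]) ((D.length : Int)) = v := by
  unfold gD
  rw [Int.toNat_natCast, List.getD_append_right _ _ _ _ (le_refl _)]
  simp


lemma mem_window (D : List Int) (y : Int) :
    y ∈ D.reverse.take 6 ↔ ∃ k : Nat, k < D.length ∧ D.length ≤ k + 6 ∧ y = D.getD k 0 := by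
  constructor
  · intro hy
    rw [List.mem_iff_getElem] at hy
    obtain ⟨i, hi, hget⟩ := hy
    have hi' : i < 6 ∧ i < D.length := by
      constructor <;> [skip; skip] <;>
        · have := hi; simp at this; omega
    refine ⟨D.length - 1 - i, by omega, by omega, ?_⟩
    rw [List.getElem_take, List.getElem_reverse] at hget
    rw [List.getD_eq_getElem _ _ (by omega)]
    rw [← hget]
  · rintro ⟨k, hk, hk6, rfl⟩
    rw [List.mem_iff_getElem]
    refine ⟨D.length - 1 - k, by simp; omega, ?_⟩
    rw [List.getElem_take, List.getElem_reverse]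
    have hidx : D.length - 1 - (D.length - 1 - k) = k := by omega
    rw [List.getD_eq_getElem _ _ hk]
    congr 1


lemma head_max (D q1 : List Int) (hD : D ≠ []) (hne : q1 ≠ [])
    (hdec : List.Pairwise (fun a b => gD D b < gD D a) q1)
    (hbnd : ∀ j ∈ q1, 0 ≤ j ∧ (D.length : Int) ≤ j + 6 ∧ j < (D.length : Int))
    (hdom : ∀ k : Nat, k < D.length → D.length ≤ k + 6 →
       ∃ j ∈ q1, (k : Int) ≤ j ∧ D.getD k 0 ≤ gD D j) :
    gD D (q1.headD 0) = (PySem.List.max? (D.reverse.take 6) (fun x => x)).getD 0 := by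
  obtain ⟨h1, t1, rfl⟩ := List.exists_cons_of_ne_nil hne
  rw [List.headD_cons]
  -- the window is nonempty
  have hwne : D.reverse.take 6 ≠ [] := by
    simp [List.length_pos_iff.symm]
    match D with
    | [] => exact absurd rfl hD
    | d :: ds => simp
  obtain ⟨m, hm⟩ : ∃ m, PySem.List.max? (D.reverse.take 6) (fun x => x) = some m := by
    match hmm : PySem.List.max? (D.reverse.take 6) (fun x => x) with
    | some m => exact ⟨m, rfl⟩
    | none => exact absurd ((PySem.List.max?_eq_none_iff _ _).1 hmm) hwne
  rw [hm, Option.getD_some]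
  have hmmem : m ∈ D.reverse.take 6 := PySem.List.max?_mem hm
  have hmax : ∀ y ∈ D.reverse.take 6, y ≤ m := by
    intro y hy
    exact PySem.List.max?_isMax hm y hy
  have hh1 := hbnd h1 (by simp)
  -- h1 is a window index, so its value is ≤ m
  have hle1 : gD D h1 ≤ m := by
    apply hmax
    rw [mem_window]
    exact ⟨h1.toNat, by omega, by omega, rfl⟩
  -- m is a window value, dominated via hdom by some deque value ≤ the head value
  have hle2 : m ≤ gD D h1 := by
    obtain ⟨k, hk, hk6, rfl⟩ := (mem_window D m).1 hmmem
    obtain ⟨j, hjq, hkj, hjv⟩ := hdom k hk hk6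
    have hjh : gD D j ≤ gD D h1 := by
      rcases (by simpa using hjq : j = h1 ∨ j ∈ t1) with rfl | hjt
      · exact le_refl _
      · exact le_of_lt ((List.pairwise_cons.1 hdec).1 j hjt)
    omega
  omega


lemma evict_facts (D q : List Int) (h : InvP D q)
    (q1 : List Int) (hq1 : q1 = if q.headD 0 < (D.length : Int) - 6 then q.tail else q) :
    q1 ≠ [] ∧ List.Pairwise (· < ·) q1 ∧ List.Pairwise (fun a b => gD D b < gD D a) q1 ∧
    (∀ j ∈ q1, 0 ≤ j ∧ (D.length : Int) ≤ j + 6 ∧ j < (D.length : Int)) ∧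
    q1.getLast? = some ((D.length : Int) - 1) ∧
    (∀ k : Nat, k < D.length → D.length ≤ k + 6 →
       ∃ j ∈ q1, (k : Int) ≤ j ∧ D.getD k 0 ≤ gD D j) := by
  obtain ⟨hne, hinc, hdec, hbnd, hlast, hdom⟩ := h
  obtain ⟨h0, t, rfl⟩ := List.exists_cons_of_ne_nil hne
  rw [List.headD_cons] at hq1
  by_cases hev : h0 < (D.length : Int) - 6
  · rw [if_pos hev] at hq1
    simp only [List.tail_cons] at hq1
    subst hq1
    have hbh0 := hbnd h0 (by simp)
    have htne : q1 ≠ [] := by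
      intro hqe
      subst hqe
      rw [List.getLast?_singleton] at hlast
      have : h0 = (D.length : Int) - 1 := by simpa using hlast
      omega
    obtain ⟨b, bs, rfl⟩ := List.exists_cons_of_ne_nil htne
    refine ⟨by simp, (List.pairwise_cons.1 hinc).2, (List.pairwise_cons.1 hdec).2, ?_, ?_, ?_⟩
    · intro j hj
      have hb := hbnd j (by simp [hj])
      have hlt := (List.pairwise_cons.1 hinc).1 j hj
      omega
    · rw [← hlast, List.getLast?_cons_cons]
    · intro k hk hk6
      obtain ⟨j, hjq, hkj, hjv⟩ := hdom k hk hk6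
      have hkint : (D.length : Int) ≤ (k : Int) + 6 := by exact_mod_cast hk6
      rcases (by simpa using hjq : j = h0 ∨ j ∈ b :: bs) with rfl | hjt
      · omega
      · exact ⟨j, hjt, hkj, hjv⟩
  · rw [if_neg hev] at hq1
    subst hq1
    refine ⟨hne, hinc, hdec, ?_, hlast, hdom⟩
    intro j hj
    have hb := hbnd j hj
    rcases (by simpa using hj : j = h0 ∨ j ∈ t) with rfl | hjt
    · omega
    · have hlt := (List.pairwise_cons.1 hinc).1 j hjt
      have hbh0 := hbnd h0 (by simp)
      omega


lemma bstep_main (As D q : List Int) (hD : D ≠ []) (h : InvP D q) :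
    (bstepB As (D, q) D.length).1
        = D ++ [((PySem.List.max? (D.reverse.take 6) (fun x => x)).getD 0) + As.getD D.length 0]
      ∧ InvP (bstepB As (D, q) D.length).1 (bstepB As (D, q) D.length).2 := by
  obtain ⟨hne1, hinc1, hdec1, hbnd1, hlast1, hdom1⟩ :=
    evict_facts D q h (if q.headD 0 < (D.length : Int) - 6 then q.tail else q) rfl
  simp only [bstepB]
  set q1 := if q.headD 0 < (D.length : Int) - 6 then q.tail else q with hq1
  set v := D.getD (q1.headD 0).toNat 0 + As.getD D.length 0 with hv
  have hvm : v = ((PySem.List.max? (D.reverse.take 6) (fun x => x)).getD 0) + As.getD D.length 0 := by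
    rw [hv, ← head_max D q1 hD hne1 hdec1 hbnd1 hdom1]
    rfl
  set r := popBack D v q1 with hr
  have hrsub : List.Sublist r q1 := popBack_sublist D v q1
  have hrmem : ∀ x ∈ r, x ∈ q1 := fun x hx => hrsub.subset hx
  have hrgt : ∀ x ∈ r, v < gD D x := popBack_gt D v q1 hdec1
  have hlen : ((D ++ [v]).length : Int) = (D.length : Int) + 1 := by simp
  refine ⟨by rw [hvm], by simp, ?_, ?_, ?_, ?_, ?_⟩
  · -- strictly increasing
    refine List.pairwise_append.2 ⟨hinc1.sublist hrsub, by simp, ?_⟩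
    intro x hx y hy
    have : y = (D.length : Int) := by simpa using hy
    subst this
    exact (hbnd1 x (hrmem x hx)).2.2
  · -- dp-values strictly decreasing
    refine List.pairwise_append.2 ⟨?_, by simp, ?_⟩
    · refine (hdec1.sublist hrsub).imp_of_mem ?_
      intro a b ha hb hab
      have hba := hbnd1 b (hrmem b hb)
      have haa := hbnd1 a (hrmem a ha)
      rw [gD_concat_lt D v a haa.1 haa.2.2, gD_concat_lt D v b hba.1 hba.2.2]
      exact hab
    · intro x hx y hy
      have : y = (D.length : Int) := by simpa using hy
      subst this
      have hbx := hbnd1 x (hrmem x hx)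
      rw [gD_concat_self, gD_concat_lt D v x hbx.1 hbx.2.2]
      exact hrgt x hx
  · -- bounds
    intro j hj
    rw [hlen]
    rcases List.mem_append.1 hj with hjr | hjn
    · have := hbnd1 j (hrmem j hjr)
      refine ⟨this.1, by omega, by omega⟩
    · have : j = (D.length : Int) := by simpa using hjn
      omega
  · -- last element is the new index
    rw [List.getLast?_concat, hlen]
    congr 1
    omega
  · -- window domination
    intro k hk hk6
    simp only [List.length_append, List.length_cons, List.length_nil] at hk hk6
    by_cases hkn : k = D.length
    · subst hkn
      refine ⟨(D.length : Int), by simp, le_refl _, ?_⟩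
      rw [gD_concat_self]
      rw [List.getD_append_right _ _ _ _ (le_refl _)]
      simp
    · have hk' : k < D.length := by omega
      have hk6' : D.length ≤ k + 6 := by omega
      obtain ⟨j, hjq, hkj, hjv⟩ := hdom1 k hk' hk6'
      have hbj := hbnd1 j hjq
      have hgk : (D ++ [v]).getD k 0 = D.getD k 0 := List.getD_append _ _ _ _ hk'
      rcases popBack_class D v q1 j hjq with hjr | hjle
      · refine ⟨j, List.mem_append.2 (Or.inl hjr), hkj, ?_⟩
        rw [hgk, gD_concat_lt D v j hbj.1 hbj.2.2]
        exact hjv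
      · refine ⟨(D.length : Int), by simp, by exact_mod_cast le_of_lt hk', ?_⟩
        rw [hgk, gD_concat_self]
        have : gD D j ≤ v := hjle
        omega


lemma b_loop (As : List Int) : ∀ (rest W q : List Int), W ≠ [] → InvP W.reverse q →
    As.drop W.length = rest →
    ((List.range' W.length rest.length).foldl (bstepB As) (W.reverse, q)).1
      = (rest.foldl stepW W).reverse := by
  intro rest
  induction rest with
  | nil => intro W q hW hInv hdrop; simp
  | cons a rest ih =>
    intro W q hW hInv hdrop
    have hlen : W.length < As.length := by
      by_contra hcon
      rw [List.drop_eq_nil_of_le (by omega)] at hdrop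
      exact (List.cons_ne_nil a rest) hdrop.symm
    have hget : As.getD W.length 0 = a := by
      rw [List.getD_eq_getElem _ _ hlen]
      have := List.getElem_drop (xs := As) (i := W.length) (j := 0) (h := by simp [hdrop])
      simpa [hdrop] using this.symm
    have hdrop' : As.drop (W.length + 1) = rest := by
      rw [← List.drop_drop]
      simp [hdrop]
    have hDne : W.reverse ≠ [] := by simpa using hW
    have hmain := bstep_main As W.reverse q hDne hInv
    rw [List.length_reverse] at hmain
    have hfst : (bstepB As (W.reverse, q) W.length).1 = (stepW W a).reverse := by
      rw [hmain.1, List.reverse_reverse, hget, stepW, List.reverse_cons]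
    have hsnd := hmain.2
    rw [hfst] at hsnd
    have hstate : bstepB As (W.reverse, q) W.length
        = ((stepW W a).reverse, (bstepB As (W.reverse, q) W.length).2) := by
      rw [← hfst]
    rw [List.length_cons, List.range'_succ, List.foldl_cons, hstate]
    have hlen' : (stepW W a).length = W.length + 1 := by simp [stepW]
    have := ih (stepW W a) (bstepB As (W.reverse, q) W.length).2
      (by simp [stepW]) hsnd (by rw [hlen']; exact hdrop')
    rw [hlen'] at this
    simpa using this


lemma solution_alt_eq (a0 : Int) (rest : List Int) :
    solution_alt (a0 :: rest) = (rest.foldl stepW [a0]).headD 0 := by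
  have hInv0 : InvP ([a0] : List Int).reverse [0] := by
    refine ⟨by simp, by simp, by simp, ?_, by simp, ?_⟩
    · intro j hj
      have : j = 0 := by simpa using hj
      subst this
      simp
    · intro k hk hk6
      simp at hk
      subst hk
      exact ⟨0, by simp, by simp, by simp [gD]⟩
  have hloop := b_loop (a0 :: rest) rest [a0] [0] (by simp) hInv0 (by simp)
  simp only [List.reverse_singleton, List.length_singleton] at hloop
  simp only [solution_alt, List.length_cons, Nat.add_sub_cancel]
  rw [hloop, PySem.List.pyGet?_neg_one, List.getLast?_reverse]
  cases h : rest.foldl stepW [a0] with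
  | nil => rfl
  | cons w ws => rfl

-- ===== VERDICT (by name: the statement is the Claim_ definition above) =====
theorem solution_spec : Claim_equal_solution := by
  intro A _ hpre
  match A with
  | [] => exact absurd rfl hpre
  | a0 :: rest =>
    show solution (a0 :: rest) = solution_alt (a0 :: rest)
    rw [solution_eq, solution_alt_eq]
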